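-- pv_equiv track=rewrite | github.com/figureoutai/snipsnap | assort_clips_service.py | consolidate_groups
-- ===== SOURCE A (Python) =====
-- def consolidate_groups(groups):
--     if not groups:
--         return []
--
--     consolidated = [groups[0]]
--
--     for start, end in groups[1:]:
--         prev_start, prev_end = consolidated[-1]
--
--         # If the new group starts just one index after the previous group ends
--         if start - prev_end == 2:
--             # Merge the groups
--             consolidated[-1] = (prev_start, end)
--         else:
--             consolidated.append((start, end))
--
--     return consolidated
-- ===== SOURCE B (Python) =====
-- def consolidate_groups(groups):
--     res = []
--     i = 0
--     n = len(groups)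
--     while i < n:
--         # scan to the end of the run starting at i
--         j = i
--         while j + 1 < n and groups[j + 1][0] - groups[j][1] == 2:
--             j += 1
--         res.append((groups[i][0], groups[j][1]))
--         i = j + 1
--     return res
-- ===== Notes on version B (the rewrite author's own statement) =====
-- stated objective: alternative
-- what changed: B replaces A's fold that keeps mutating the last element of an accumulator with a run-splitting scan: it finds each maximal run chained by gap 2 and emits one (run_start, run_end) pair per run, never rewriting output already produced.
import Mathlib
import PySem

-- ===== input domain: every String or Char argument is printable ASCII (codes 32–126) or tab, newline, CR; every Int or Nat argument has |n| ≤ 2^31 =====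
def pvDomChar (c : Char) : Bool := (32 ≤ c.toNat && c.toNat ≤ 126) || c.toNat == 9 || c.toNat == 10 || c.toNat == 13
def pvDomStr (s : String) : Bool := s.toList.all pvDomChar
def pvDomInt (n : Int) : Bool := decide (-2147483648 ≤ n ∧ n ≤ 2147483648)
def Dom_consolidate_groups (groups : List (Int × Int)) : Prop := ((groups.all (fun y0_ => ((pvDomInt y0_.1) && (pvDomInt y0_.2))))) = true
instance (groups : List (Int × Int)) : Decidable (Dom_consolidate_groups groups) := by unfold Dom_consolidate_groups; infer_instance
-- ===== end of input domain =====

-- B replaces A's mutate-the-last-element fold with a run-splitting scan (alternative decomposition, same O(n) cost).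


-- ===== PORT A =====
-- loop body: consolidated = done ++ [prev]; merge into prev or append prev to done
def pvStepA (st : List (Int × Int) × (Int × Int)) (se : Int × Int) : List (Int × Int) × (Int × Int) :=
  if se.1 - st.2.2 = 2 then (st.1, (st.2.1, se.2)) else (st.1 ++ [st.2], se)

def consolidate_groups (groups : List (Int × Int)) : List (Int × Int) :=
  match groups with
  | [] => []
  | g0 :: rest =>
    let st := rest.foldl pvStepA ([], g0)
    st.1 ++ [st.2]

-- ===== PORT B =====
-- inner while loop: consume the run chained to g by gaps of 2; return (run end, remainder)
def pvRun : (Int × Int) → List (Int × Int) → Int × List (Int × Int)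
  | g, [] => (g.2, [])
  | g, h :: t => if h.1 - g.2 = 2 then pvRun h t else (g.2, h :: t)

lemma pvRun_len (g : Int × Int) (l : List (Int × Int)) : (pvRun g l).2.length ≤ l.length := by
  induction l generalizing g with
  | nil => simp [pvRun]
  | cons h t ih =>
    simp only [pvRun]
    split
    · exact le_trans (ih h) (Nat.le_succ _)
    · simp

def consolidate_groups_alt : List (Int × Int) → List (Int × Int)
  | [] => []
  | g :: rest =>
    let r := pvRun g rest
    (g.1, r.1) :: consolidate_groups_alt r.2
termination_by l => l.length
decreasing_by
  simpa using Nat.lt_succ_of_le (pvRun_len g rest)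

-- ===== PRECONDITION & SPEC =====
def Spec_consolidate_groups (groups : List (Int × Int)) (out : List (Int × Int)) : Prop := out = consolidate_groups_alt groups
instance (groups : List (Int × Int)) (out : List (Int × Int)) : Decidable (Spec_consolidate_groups groups out) := by unfold Spec_consolidate_groups; infer_instance

-- ===== CLAIM (what is proved, stated in full; the proofs are below) =====
def Claim_equal_consolidate_groups : Prop := ∀ (groups : List (Int × Int)), Dom_consolidate_groups groups → Spec_consolidate_groups groups (consolidate_groups groups)

-- ===== LEMMAS AND PROOFS =====
lemma pvRun_snd_only (a b x : Int) (l : List (Int × Int)) : pvRun (a, x) l = pvRun (b, x) l := by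
  cases l with
  | nil => simp [pvRun]
  | cons h t => simp [pvRun]

lemma loopA_eq (rest : List (Int × Int)) : ∀ (done : List (Int × Int)) (prev : Int × Int),
    (rest.foldl pvStepA (done, prev)).1 ++ [(rest.foldl pvStepA (done, prev)).2]
      = done ++ consolidate_groups_alt (prev :: rest) := by
  induction rest with
  | nil => intro done prev; simp [consolidate_groups_alt, pvRun]
  | cons h t ih =>
    intro done prev
    by_cases hc : h.1 - prev.2 = 2
    · have h1 : List.foldl pvStepA (done, prev) (h :: t)
          = List.foldl pvStepA (done, (prev.1, h.2)) t := by
        simp [List.foldl, pvStepA, hc]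
      rw [h1, ih done (prev.1, h.2)]
      congr 1
      symm
      show consolidate_groups_alt (prev :: h :: t) = consolidate_groups_alt ((prev.1, h.2) :: t)
      simp only [consolidate_groups_alt, pvRun, hc, if_pos]
      have : pvRun h t = pvRun (prev.1, h.2) t := by
        rw [show h = (h.1, h.2) from rfl]; exact pvRun_snd_only h.1 prev.1 h.2 t
      rw [this]
    · have h1 : List.foldl pvStepA (done, prev) (h :: t)
          = List.foldl pvStepA (done ++ [prev], h) t := by
        simp [List.foldl, pvStepA, hc]
      rw [h1, ih (done ++ [prev]) h]
      show (done ++ [prev]) ++ consolidate_groups_alt (h :: t)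
          = done ++ consolidate_groups_alt (prev :: h :: t)
      have h2 : consolidate_groups_alt (prev :: h :: t) = prev :: consolidate_groups_alt (h :: t) := by
        simp only [consolidate_groups_alt, pvRun, hc, if_neg, not_false_iff]
      rw [h2]; simp

-- ===== VERDICT (by name: the statement is the Claim_ definition above) =====
theorem consolidate_groups_spec : Claim_equal_consolidate_groups := by
  intro groups _
  unfold Spec_consolidate_groups consolidate_groups
  cases groups with
  | nil => simp [consolidate_groups_alt]
  | cons g rest => simpa using loopA_eq rest [] g
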